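-- pv_equiv track=rewrite | github.com/MacGyver1618/advent-of-code | common/advent_lib.py | extract_subtree
-- ===== SOURCE A (Python) =====
-- import collections
--
-- def extract_subtree(graph, subtree_root):
--     result = set()
--     Q = collections.deque()
--     Q.append(subtree_root)
--     while Q:
--         n = Q.popleft()
--         for (a,b) in graph:
--             if b == n:
--                 result.add((a,b))
--                 Q.append(a)
--     return result
-- ===== SOURCE B (Python) =====
-- def extract_subtree(graph, subtree_root):
--     edges_in = {}
--     for a, b in graph:
--         edges_in.setdefault(b, []).append((a, b))
--     order = []
--     seen = {subtree_root}
--     frontier = [subtree_root]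
--     while frontier:
--         order += frontier
--         nxt = []
--         for n in frontier:
--             for a, _ in edges_in.get(n, ()):
--                 if a not in seen:
--                     seen.add(a)
--                     nxt.append(a)
--         frontier = nxt
--     return {e for n in order for e in edges_in.get(n, ())}
-- ===== Notes on version B (the rewrite author's own statement) =====
-- stated objective: alternative
-- what changed: B indexes edges by target once, computes the node visit order with a level-synchronous BFS (whole-frontier rounds with a visited set) instead of A's per-node queue that rescans the entire edge list and re-enqueues already-processed nodes, and then collects the result edges in a separate pass over that order.
import Mathlib
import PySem

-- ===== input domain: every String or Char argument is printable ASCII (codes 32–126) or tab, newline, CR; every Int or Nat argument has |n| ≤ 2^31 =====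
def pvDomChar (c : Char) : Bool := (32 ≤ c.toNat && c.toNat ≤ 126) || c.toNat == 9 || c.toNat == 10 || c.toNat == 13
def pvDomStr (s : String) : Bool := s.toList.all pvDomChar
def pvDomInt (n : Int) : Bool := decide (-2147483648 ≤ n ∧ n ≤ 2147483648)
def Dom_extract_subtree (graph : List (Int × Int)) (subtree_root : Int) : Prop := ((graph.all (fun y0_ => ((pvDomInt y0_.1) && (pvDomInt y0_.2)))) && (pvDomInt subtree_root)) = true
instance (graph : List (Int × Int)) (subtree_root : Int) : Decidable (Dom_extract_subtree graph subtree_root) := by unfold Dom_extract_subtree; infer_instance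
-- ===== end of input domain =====

-- B replaces A's visited-set-free per-node BFS (which rescans the whole edge list for every
-- queue entry and re-enqueues already-processed nodes) by: an index of the edges by target
-- built once, a level-synchronous BFS with a visited set computing the node visit order, and
-- a separate final pass collecting the edges along that order.

-- ===== PORT A =====
-- one iteration of A's inner 'for (a,b) in graph: if b == n: result.add((a,b)); Q.append(a)'
def pvStepA (n : Int) (s : PySem.Set (Int × Int) × List Int) (e : Int × Int) :
    PySem.Set (Int × Int) × List Int :=
  if e.2 = n then (PySem.Set.add s.1 e, s.2 ++ [e.1]) else s

-- A's 'while Q:' loop; the fuel is a port artifact: inside Pre_ it is proved sufficient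
-- (A's loop terminates there), outside Pre_ A's Python never returns.
def pvLoopA (graph : List (Int × Int)) :
    Nat → PySem.Set (Int × Int) → List Int → PySem.Set (Int × Int)
  | 0, res, _ => res
  | _ + 1, res, [] => res
  | fuel + 1, res, n :: Q =>
      let s := graph.foldl (pvStepA n) (res, Q)
      pvLoopA graph fuel s.1 s.2

def extract_subtree (graph : List (Int × Int)) (subtree_root : Int) : List (Int × Int) :=
  pvLoopA graph ((graph.length + 1) ^ (2 * graph.length + 2)) PySem.Set.empty [subtree_root]

-- ===== PORT B =====
-- 'for a, b in graph: edges_in.setdefault(b, []).append((a, b))'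
def pvIdx (graph : List (Int × Int)) : PySem.Dict Int (List (Int × Int)) :=
  graph.foldl (fun d e => d.modify e.2 [] (· ++ [e])) PySem.Dict.empty

-- the body of one 'while frontier:' round: 'for n in frontier: for a,_ in …: if a not in seen…',
-- threading (seen, nxt)
def pvRound (bt : PySem.Dict Int (List (Int × Int))) (seen : PySem.Set Int) (F : List Int) :
    PySem.Set Int × List Int :=
  F.foldl (fun st n =>
    (bt.getD n []).foldl (fun st e =>
      if PySem.Set.contains st.1 e.1 then st else (PySem.Set.add st.1 e.1, st.2 ++ [e.1])) st)
    (seen, [])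

-- B's level-by-level loop, returning 'order'; B's Python always terminates, and fuel
-- graph.length + 2 is proved sufficient below (every round past the first visits fresh nodes).
def pvLvl (bt : PySem.Dict Int (List (Int × Int))) :
    Nat → List Int → PySem.Set Int → List Int
  | 0, _, _ => []
  | _ + 1, [], _ => []
  | fuel + 1, F, seen =>
      let s := pvRound bt seen F
      F ++ pvLvl bt fuel s.2 s.1

-- '{e for n in order for e in edges_in.get(n, ())}'
def extract_subtree_alt (graph : List (Int × Int)) (subtree_root : Int) : List (Int × Int) :=
  let bt := pvIdx graph
  let order := pvLvl bt (graph.length + 2) [subtree_root]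
      (PySem.Set.add PySem.Set.empty subtree_root)
  PySem.Set.ofList (order.flatMap (fun n => bt.getD n []))

-- ===== PRECONDITION & SPEC =====
-- nodes backward-reachable from the root (saturation; graph.length + 1 passes always saturate)
def pvReach (graph : List (Int × Int)) (root : Int) : PySem.Set Int :=
  (List.range (graph.length + 1)).foldl
    (fun R _ => graph.foldl
      (fun R e => if PySem.Set.contains R e.2 then PySem.Set.add R e.1 else R) R)
    (PySem.Set.add PySem.Set.empty root)

def pvLook (t : List (Int × Nat)) (x : Int) : Nat :=
  ((t.find? (fun p => p.1 == x)).map (·.2)).getD 0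

-- max over incoming edges of (height of source + 1)
def pvHStep (graph : List (Int × Int)) (h : Int → Nat) (n : Int) : Nat :=
  graph.foldl (fun acc e => if e.2 = n then max acc (h e.1 + 1) else acc) 0

def pvNodes (graph : List (Int × Int)) : List Int :=
  PySem.List.dedup (graph.map (·.1) ++ graph.map (·.2))

def pvHTab (graph : List (Int × Int)) : Nat → List (Int × Nat)
  | 0 => []
  | k + 1 =>
      let t := pvHTab graph k
      (pvNodes graph).map (fun n => (n, pvHStep graph (fun x => pvLook t x) n))

def pvH (graph : List (Int × Int)) (n : Int) : Nat :=
  pvLook (pvHTab graph (2 * graph.length + 1)) n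

-- Pre_: the subgraph backward-reachable from subtree_root is acyclic (witnessed by a height
-- table that is backward-closed and strictly increasing along every reachable edge); outside
-- Pre_ A's BFS has no visited set, keeps re-enqueueing some reachable cycle and never returns,
-- so Pre_ is exactly the set of inputs on which A's Python terminates.
def Pre_extract_subtree (graph : List (Int × Int)) (subtree_root : Int) : Prop :=
  (graph.all (fun e =>
    !(PySem.Set.contains (pvReach graph subtree_root) e.2) ||
    (PySem.Set.contains (pvReach graph subtree_root) e.1 &&
      decide (pvH graph e.1 < pvH graph e.2)))) = true

instance (graph : List (Int × Int)) (subtree_root : Int) :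
    Decidable (Pre_extract_subtree graph subtree_root) := by
  unfold Pre_extract_subtree; infer_instance

def pvWitness_extract_subtree : (List (Int × Int)) × Int := ([(2, 1), (3, 1), (4, 2)], 1)

def Spec_extract_subtree (graph : List (Int × Int)) (subtree_root : Int)
    (out : List (Int × Int)) : Prop := out = extract_subtree_alt graph subtree_root
instance (graph : List (Int × Int)) (subtree_root : Int) (out : List (Int × Int)) :
    Decidable (Spec_extract_subtree graph subtree_root out) := by
  unfold Spec_extract_subtree; infer_instance

-- ===== CLAIM (what is proved, stated in full; the proofs are below) =====
def Claim_equal_extract_subtree : Prop :=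
  ∀ (graph : List (Int × Int)) (subtree_root : Int),
    Dom_extract_subtree graph subtree_root → Pre_extract_subtree graph subtree_root →
    Spec_extract_subtree graph subtree_root (extract_subtree graph subtree_root)

-- ===== LEMMAS AND PROOFS =====

-- ordered dedup of xs relative to an already-seen set s (ghost device for the simulation proof)
def pvDD (s : PySem.Set Int) : List Int → List Int
  | [] => []
  | x :: xs => if PySem.Set.contains s x then pvDD s xs else x :: pvDD (PySem.Set.add s x) xs

-- GHOST (proof-side only): per-node queue BFS with visited set and interleaved result,
-- the half-way point between A's loop and B's staged level loop
def pvStepG (s : PySem.Set (Int × Int) × PySem.Set Int × List Int) (e : Int × Int) :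
    PySem.Set (Int × Int) × PySem.Set Int × List Int :=
  (PySem.Set.add s.1 e,
   if PySem.Set.contains s.2.1 e.1 then (s.2.1, s.2.2)
   else (PySem.Set.add s.2.1 e.1, s.2.2 ++ [e.1]))

def pvLoopG (bt : PySem.Dict Int (List (Int × Int))) :
    Nat → PySem.Set (Int × Int) → PySem.Set Int → List Int → PySem.Set (Int × Int)
  | 0, res, _, _ => res
  | _ + 1, res, _, [] => res
  | fuel + 1, res, seen, n :: Q =>
      let s := (bt.getD n []).foldl pvStepG (res, seen, Q)
      pvLoopG bt fuel s.1 s.2.1 s.2.2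

-- GHOST: the pop order of the queue BFS (the result does not influence the traversal)
def pvOrd (bt : PySem.Dict Int (List (Int × Int))) :
    Nat → PySem.Set Int → List Int → List Int
  | 0, _, _ => []
  | _ + 1, _, [] => []
  | fuel + 1, seen, n :: Q =>
      n :: pvOrd bt fuel (((bt.getD n []).map (·.1)).foldl PySem.Set.add seen)
        (Q ++ pvDD seen ((bt.getD n []).map (·.1)))

-- GHOST: closed form of one round (seen after, fresh nodes found, threaded left to right)
def pvRd (bt : PySem.Dict Int (List (Int × Int))) :
    PySem.Set Int → List Int → PySem.Set Int × List Int
  | seen, [] => (seen, [])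
  | seen, n :: F =>
      let s' := ((bt.getD n []).map (·.1)).foldl PySem.Set.add seen
      let r := pvRd bt s' F
      (r.1, pvDD seen ((bt.getD n []).map (·.1)) ++ r.2)

-- termination potential of A's queue
def pvPhi (graph : List (Int × Int)) (Q : List Int) : Nat :=
  (Q.map (fun n => (graph.length + 1) ^ pvH graph n)).sum

-- candidate pool for the seen set
def pvCands (graph : List (Int × Int)) : List Int := PySem.List.dedup (graph.map (·.1))

-- unseen-candidate count, the termination measure of the visited-set BFS
def pvU (graph : List (Int × Int)) (seen : PySem.Set Int) : Nat :=
  ((pvCands graph).filter (fun c => !(PySem.Set.contains seen c))).length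

lemma pvBeqInt (a b : Int) : (a == b) = decide (a = b) := by
  by_cases h : a = b <;> simp [h]

lemma mem_foldl_add_id {α : Type} [BEq α] [LawfulBEq α] (l : List α) (s : PySem.Set α) (y : α) :
    y ∈ l.foldl PySem.Set.add s ↔ y ∈ s ∨ y ∈ l := by
  simpa using PySem.Set.mem_foldl_add (f := fun x : α => x) (l := l) (s := s) (y := y)

lemma contains_false_of_not_mem {α : Type} [BEq α] [LawfulBEq α] (s : PySem.Set α) (x : α)
    (h : x ∉ s) : PySem.Set.contains s x = false := by
  cases hc : PySem.Set.contains s x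
  · rfl
  · exact absurd ((PySem.Set.contains_iff _ _).mp hc) h

lemma foldl_add_of_all_mem {α : Type} [BEq α] [LawfulBEq α] (l : List α) (s : PySem.Set α)
    (h : ∀ e ∈ l, e ∈ s) : l.foldl PySem.Set.add s = s := by
  induction l with
  | nil => rfl
  | cons e l ih =>
    simp only [List.foldl_cons, PySem.Set.add_of_mem (h e (by simp))]
    exact ih (fun x hx => h x (by simp [hx]))

-- A's inner loop over the whole edge list, characterised
lemma foldA_char (n : Int) (g : List (Int × Int)) (res : PySem.Set (Int × Int)) (Q : List Int) :
    g.foldl (pvStepA n) (res, Q) =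
      ((g.filter (fun e => decide (e.2 = n))).foldl PySem.Set.add res,
       Q ++ ((g.filter (fun e => decide (e.2 = n))).map (·.1))) := by
  induction g generalizing res Q with
  | nil => simp
  | cons e g ih =>
    by_cases h : e.2 = n
    · simp [pvStepA, h, ih]
    · simp [pvStepA, h, ih]

-- the edges_in index holds exactly the edges with the given target, in graph order
lemma pvIdx_getD (g : List (Int × Int)) (n : Int) :
    (pvIdx g).getD n [] = g.filter (fun e => decide (e.2 = n)) := by
  unfold pvIdx
  have h1 : g.foldl (fun d e => d.modify e.2 [] (· ++ [e])) PySem.Dict.empty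
      = (g.map (fun e => (e.2, e))).foldl (fun d p => d.modify p.1 [] (· ++ [p.2]))
          PySem.Dict.empty := by
    rw [List.foldl_map]
  rw [h1, PySem.Dict.getD_foldl_modify_append, PySem.Dict.getD_empty]
  simp only [List.nil_append, List.filter_map, Function.comp_def, List.map_map]
  rw [List.map_id']
  apply List.filter_congr
  intro e _
  exact pvBeqInt e.2 n

-- the ghost's inner loop over the indexed edges, characterised
lemma foldG_char (es : List (Int × Int)) (res : PySem.Set (Int × Int)) (seen : PySem.Set Int)
    (q : List Int) :
    es.foldl pvStepG (res, seen, q) =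
      (es.foldl PySem.Set.add res,
       (es.map (·.1)).foldl PySem.Set.add seen,
       q ++ pvDD seen (es.map (·.1))) := by
  induction es generalizing res seen q with
  | nil => simp [pvDD]
  | cons e es ih =>
    by_cases hm : e.1 ∈ seen
    · simp [pvStepG, hm, ih, pvDD]
    · simp [pvStepG, hm, ih, pvDD]

-- B's inner (per-node) loop of a round, characterised the same way
lemma foldR_char (es : List (Int × Int)) (st : PySem.Set Int × List Int) :
    es.foldl (fun st e =>
        if PySem.Set.contains st.1 e.1 then st
        else (PySem.Set.add st.1 e.1, st.2 ++ [e.1])) st =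
      ((es.map (·.1)).foldl PySem.Set.add st.1, st.2 ++ pvDD st.1 (es.map (·.1))) := by
  induction es generalizing st with
  | nil => simp [pvDD]
  | cons e es ih =>
    simp only [List.foldl_cons, List.map_cons, pvDD]
    by_cases hm : e.1 ∈ st.1
    · have hc : PySem.Set.contains st.1 e.1 = true := (PySem.Set.contains_iff _ _).mpr hm
      rw [if_pos hc, if_pos hc, PySem.Set.add_of_mem hm, ih]
    · have hc : PySem.Set.contains st.1 e.1 = false := contains_false_of_not_mem _ _ hm
      rw [hc]
      simp only [Bool.false_eq_true, if_false, ih]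
      simp

-- B's round fold computes the ghost round
lemma round_char (bt : PySem.Dict Int (List (Int × Int))) (F : List Int)
    (seen : PySem.Set Int) (acc : List Int) :
    F.foldl (fun st n =>
        (bt.getD n []).foldl (fun st e =>
          if PySem.Set.contains st.1 e.1 then st
          else (PySem.Set.add st.1 e.1, st.2 ++ [e.1])) st) (seen, acc) =
      ((pvRd bt seen F).1, acc ++ (pvRd bt seen F).2) := by
  induction F generalizing seen acc with
  | nil => simp [pvRd]
  | cons n F ih =>
    simp only [List.foldl_cons]
    rw [foldR_char, ih]
    simp [pvRd, List.append_assoc]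

lemma pvRound_eq (bt : PySem.Dict Int (List (Int × Int))) (seen : PySem.Set Int)
    (F : List Int) : pvRound bt seen F = pvRd bt seen F := by
  unfold pvRound
  rw [round_char]
  simp

lemma pvDD_append (s : PySem.Set Int) (xs ys : List Int) :
    pvDD s (xs ++ ys) = pvDD s xs ++ pvDD (xs.foldl PySem.Set.add s) ys := by
  induction xs generalizing s with
  | nil => simp [pvDD]
  | cons x xs ih =>
    by_cases hm : x ∈ s
    · simp [pvDD, hm, ih]
    · simp [pvDD, hm, ih]

lemma pvDD_congr (xs : List Int) (s s' : PySem.Set Int) (h : ∀ x, x ∈ s ↔ x ∈ s') :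
    pvDD s xs = pvDD s' xs := by
  induction xs generalizing s s' with
  | nil => rfl
  | cons x xs ih =>
    have hc : PySem.Set.contains s x = PySem.Set.contains s' x := by
      by_cases hx : x ∈ s'
      · rw [(PySem.Set.contains_iff _ _).mpr hx, (PySem.Set.contains_iff _ _).mpr ((h x).mpr hx)]
      · rw [contains_false_of_not_mem _ _ hx, contains_false_of_not_mem _ _ (fun hs => hx ((h x).mp hs))]
    simp only [pvDD, hc]
    cases hc' : PySem.Set.contains s' x
    · simp only [Bool.false_eq_true, if_false]
      refine congrArg _ (ih _ _ ?_)
      intro y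
      simp [PySem.Set.mem_add, h y]
    · simp only [if_true]
      exact ih _ _ h

lemma pvDD_eq_nil (s : PySem.Set Int) (xs : List Int) (h : ∀ x ∈ xs, x ∈ s) :
    pvDD s xs = [] := by
  induction xs with
  | nil => rfl
  | cons x xs ih =>
    simp [pvDD, h x (by simp), ih (fun y hy => h y (by simp [hy]))]

-- heights are bounded by the number of relaxation rounds
lemma pvHStep_le (g : List (Int × Int)) (h : Int → Nat) (n : Int) (k : Nat)
    (hh : ∀ x, h x ≤ k) : pvHStep g h n ≤ k + 1 := by
  unfold pvHStep
  have H : ∀ (l : List (Int × Int)) (acc : Nat), acc ≤ k + 1 →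
      l.foldl (fun acc e => if e.2 = n then max acc (h e.1 + 1) else acc) acc ≤ k + 1 := by
    intro l
    induction l with
    | nil => intro acc ha; simpa
    | cons e l ih =>
      intro acc ha
      simp only [List.foldl_cons]
      split
      · exact ih _ (Nat.max_le.mpr ⟨ha, Nat.succ_le_succ (hh e.1)⟩)
      · exact ih _ ha
  exact H g 0 (by omega)

lemma pvLook_pvHTab_le (g : List (Int × Int)) (k : Nat) (n : Int) :
    pvLook (pvHTab g k) n ≤ k := by
  induction k generalizing n with
  | zero => simp [pvHTab, pvLook]
  | succ k ih =>
    rw [pvLook]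
    cases hf : List.find? (fun p => p.1 == n) (pvHTab g (k + 1)) with
    | none => simp
    | some p =>
      have hp := List.mem_of_find?_eq_some hf
      simp only [pvHTab] at hp
      obtain ⟨m, _, rfl⟩ := List.mem_map.mp hp
      simp only [Option.map_some, Option.getD_some]
      exact pvHStep_le _ _ _ k (fun x => ih x)

lemma pvH_le (g : List (Int × Int)) (n : Int) : pvH g n ≤ 2 * g.length + 1 :=
  pvLook_pvHTab_le g _ n

-- reachability set only grows
lemma mem_foldl_reachstep (g : List (Int × Int)) (s : PySem.Set Int) (x : Int) (hx : x ∈ s) :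
    x ∈ g.foldl (fun R e => if PySem.Set.contains R e.2 then PySem.Set.add R e.1 else R) s := by
  induction g generalizing s with
  | nil => exact hx
  | cons e g ih =>
    simp only [List.foldl_cons]
    split
    · exact ih _ (by simp [hx])
    · exact ih _ hx

lemma root_mem_pvReach (g : List (Int × Int)) (root : Int) : root ∈ pvReach g root := by
  unfold pvReach
  have H : ∀ (l : List Nat) (s : PySem.Set Int), root ∈ s →
      root ∈ l.foldl (fun R _ => g.foldl
        (fun R e => if PySem.Set.contains R e.2 then PySem.Set.add R e.1 else R) R) s := by
    intro l
    induction l with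
    | nil => intro s hs; exact hs
    | cons a l ih => intro s hs; exact ih _ (mem_foldl_reachstep g s root hs)
  exact H _ _ (by simp)

-- what Pre_ says, edge by edge
lemma pre_edges (g : List (Int × Int)) (root : Int) (hpre : Pre_extract_subtree g root) :
    ∀ e ∈ g, e.2 ∈ pvReach g root →
      e.1 ∈ pvReach g root ∧ pvH g e.1 < pvH g e.2 := by
  intro e he h2
  have h := (List.all_eq_true.mp hpre) e he
  simp only [Bool.or_eq_true, Bool.not_eq_true', Bool.and_eq_true, decide_eq_true_eq] at h
  rcases h with h | ⟨h1, hlt⟩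
  · rw [(PySem.Set.contains_iff _ _).mpr h2] at h
    exact Bool.noConfusion h
  · exact ⟨(PySem.Set.contains_iff _ _).mp h1, hlt⟩

lemma pvPhi_append (g : List (Int × Int)) (Q1 Q2 : List Int) :
    pvPhi g (Q1 ++ Q2) = pvPhi g Q1 + pvPhi g Q2 := by
  simp [pvPhi]

lemma pvPhi_cons (g : List (Int × Int)) (n : Int) (Q : List Int) :
    pvPhi g (n :: Q) = (g.length + 1) ^ pvH g n + pvPhi g Q := by
  simp [pvPhi]

-- each pop strictly decreases the potential
lemma pvPhi_step (g : List (Int × Int)) (root : Int) (hpre : Pre_extract_subtree g root)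
    (n : Int) (hn : n ∈ pvReach g root) (Q : List Int) :
    pvPhi g (Q ++ (g.filter (fun e => decide (e.2 = n))).map (·.1)) + 1 ≤ pvPhi g (n :: Q) := by
  set gn := g.filter (fun e => decide (e.2 = n)) with hgn
  have hgn_mem : ∀ e ∈ gn, e ∈ g ∧ e.2 = n := by
    intro e he
    have := List.mem_filter.mp he
    exact ⟨this.1, of_decide_eq_true this.2⟩
  rw [pvPhi_append, pvPhi_cons]
  have key : pvPhi g (gn.map (·.1)) + 1 ≤ (g.length + 1) ^ pvH g n := by
    by_cases hgn0 : gn = []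
    · rw [hgn0]
      simpa [pvPhi] using Nat.one_le_pow (pvH g n) (g.length + 1) (by omega)
    · obtain ⟨e0, h0⟩ := List.exists_mem_of_ne_nil gn hgn0
      have hlt0 := (pre_edges g root hpre e0 (hgn_mem e0 h0).1 ((hgn_mem e0 h0).2 ▸ hn)).2
      rw [(hgn_mem e0 h0).2] at hlt0
      have hX1 : 1 ≤ (g.length + 1) ^ (pvH g n - 1) := Nat.one_le_pow _ _ (by omega)
      have hbound : ∀ y ∈ (gn.map (·.1)).map (fun a => (g.length + 1) ^ pvH g a),
          y ≤ (g.length + 1) ^ (pvH g n - 1) := by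
        intro y hy
        obtain ⟨a, ha, rfl⟩ := List.mem_map.mp hy
        obtain ⟨e, he, rfl⟩ := List.mem_map.mp ha
        have hlt := (pre_edges g root hpre e (hgn_mem e he).1 ((hgn_mem e he).2 ▸ hn)).2
        rw [(hgn_mem e he).2] at hlt
        exact Nat.pow_le_pow_right (by omega) (by omega)
      have hsum : pvPhi g (gn.map (·.1))
          ≤ (gn.map (·.1)).length * ((g.length + 1) ^ (pvH g n - 1)) := by
        have := List.sum_le_card_nsmul _ _ hbound
        simpa [pvPhi, smul_eq_mul, Nat.mul_comm] using this
      have hlen : (gn.map (·.1)).length ≤ g.length := by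
        simpa using List.length_filter_le _ g
      have hmul : (gn.map (·.1)).length * ((g.length + 1) ^ (pvH g n - 1))
          ≤ g.length * ((g.length + 1) ^ (pvH g n - 1)) :=
        Nat.mul_le_mul_right _ hlen
      have hpow : (g.length + 1) ^ pvH g n
          = (g.length + 1) ^ (pvH g n - 1) * (g.length + 1) := by
        rw [← pow_succ]
        congr 1
        omega
      have hring : g.length * ((g.length + 1) ^ (pvH g n - 1))
            + (g.length + 1) ^ (pvH g n - 1)
          = (g.length + 1) ^ (pvH g n - 1) * (g.length + 1) := by ring
      rw [hpow]
      omega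
  omega

-- seen gaining a fresh candidate strictly shrinks the unseen-candidate count
lemma seen_drop (cands : List Int) (hnd : cands.Nodup) (s : PySem.Set Int) (x : Int)
    (hx : x ∈ cands) (hxs : x ∉ s) :
    (cands.filter (fun c => !(PySem.Set.contains (PySem.Set.add s x) c))).length + 1
      ≤ (cands.filter (fun c => !(PySem.Set.contains s c))).length := by
  induction cands with
  | nil => simp at hx
  | cons c cs ih =>
    have hnd' := (List.nodup_cons.mp hnd).2
    by_cases hcx : c = x
    · subst hcx
      have h1 : PySem.Set.contains (PySem.Set.add s c) c = true :=
        (PySem.Set.contains_iff _ _).mpr ((PySem.Set.mem_add _ _ _).mpr (Or.inr rfl))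
      have h2 : PySem.Set.contains s c = false := contains_false_of_not_mem s c hxs
      have hmono : (cs.filter (fun c' => !(PySem.Set.contains (PySem.Set.add s c) c'))).length
          ≤ (cs.filter (fun c' => !(PySem.Set.contains s c'))).length := by
        rw [← List.countP_eq_length_filter, ← List.countP_eq_length_filter]
        apply List.countP_mono_left
        intro a _ ha
        simp only [Bool.not_eq_true'] at ha ⊢
        exact contains_false_of_not_mem s a (fun hm => by
          rw [(PySem.Set.contains_iff _ _).mpr ((PySem.Set.mem_add _ _ _).mpr (Or.inl hm))] at ha
          exact Bool.noConfusion ha)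
      rw [List.filter_cons, List.filter_cons, h1, h2]
      simp only [Bool.not_true, Bool.not_false, Bool.false_eq_true, if_false, if_true,
        List.length_cons]
      omega
    · have heq : PySem.Set.contains (PySem.Set.add s x) c = PySem.Set.contains s c := by
        by_cases hm : c ∈ s
        · rw [(PySem.Set.contains_iff _ _).mpr hm,
            (PySem.Set.contains_iff _ _).mpr ((PySem.Set.mem_add _ _ _).mpr (Or.inl hm))]
        · rw [contains_false_of_not_mem s c hm, contains_false_of_not_mem _ c
            (fun hmm => by
              rcases (PySem.Set.mem_add _ _ _).mp hmm with h | h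
              · exact hm h
              · exact hcx h)]
      have hx' : x ∈ cs := by
        rcases List.mem_cons.mp hx with h | h
        · exact absurd h.symm hcx
        · exact h
      rw [List.filter_cons, List.filter_cons, heq]
      cases hc : PySem.Set.contains s c
      · simp only [Bool.not_false, if_true, List.length_cons]
        have := ih hnd' hx'
        omega
      · simp only [Bool.not_true, Bool.false_eq_true, if_false]
        exact ih hnd' hx'

-- enqueueing the dd-filtered nodes is paid for by the seen set growing
lemma mu_drop (cands : List Int) (hnd : cands.Nodup) (xs : List Int) :
    ∀ (s : PySem.Set Int), (∀ x ∈ xs, x ∈ cands) →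
    (cands.filter (fun c => !(PySem.Set.contains (xs.foldl PySem.Set.add s) c))).length
      + (pvDD s xs).length
      ≤ (cands.filter (fun c => !(PySem.Set.contains s c))).length := by
  induction xs with
  | nil => intro s _; simp [pvDD]
  | cons x xs ih =>
    intro s h
    by_cases hm : x ∈ s
    · rw [show pvDD s (x :: xs) = pvDD s xs from by
        simp only [pvDD]; rw [if_pos ((PySem.Set.contains_iff _ _).mpr hm)]]
      rw [List.foldl_cons, PySem.Set.add_of_mem hm]
      exact ih s (fun y hy => h y (List.mem_cons_of_mem _ hy))
    · rw [show pvDD s (x :: xs) = x :: pvDD (PySem.Set.add s x) xs from by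
        simp only [pvDD]
        rw [if_neg (fun hcc => hm ((PySem.Set.contains_iff _ _).mp hcc))]]
      rw [List.foldl_cons, List.length_cons]
      have h1 := ih (PySem.Set.add s x) (fun y hy => h y (List.mem_cons_of_mem _ hy))
      have h2 := seen_drop cands hnd s x (h x (by simp)) hm
      omega

-- the simulation: A's visited-set-free BFS agrees with the ghost queue BFS
lemma pvSim (g : List (Int × Int)) (root : Int) (hpre : Pre_extract_subtree g root) :
    ∀ (fA : Nat) (res : PySem.Set (Int × Int)) (QA QB : List Int)
      (P seen : PySem.Set Int) (fB : Nat),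
      (∀ x : Int, x ∈ seen ↔ (x ∈ P ∨ x ∈ QA)) →
      QB = pvDD P QA →
      (∀ e ∈ g, e.2 ∈ P → e.1 ∈ seen ∧ e ∈ res) →
      (∀ x ∈ QA, x ∈ pvReach g root) →
      pvPhi g QA ≤ fA → QB.length + pvU g seen ≤ fB →
      pvLoopA g fA res QA = pvLoopG (pvIdx g) fB res seen QB := by
  intro fA
  induction fA with
  | zero =>
    intro res QA QB P seen fB ha hb hce hf hPhi hMu
    cases QA with
    | nil =>
      rw [hb]
      cases fB <;> rfl
    | cons n QA' =>
      exfalso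
      have : 1 ≤ pvPhi g (n :: QA') := by
        rw [pvPhi_cons]
        have := Nat.one_le_pow (pvH g n) (g.length + 1) (by omega)
        omega
      omega
  | succ f ih =>
    intro res QA QB P seen fB ha hb hce hf hPhi hMu
    cases QA with
    | nil =>
      rw [hb]
      cases fB <;> rfl
    | cons n QA' =>
      have hnR : n ∈ pvReach g root := hf n (by simp)
      set gn := g.filter (fun e => decide (e.2 = n)) with hgn
      have hgn_mem : ∀ e ∈ gn, e ∈ g ∧ e.2 = n := by
        intro e he
        have := List.mem_filter.mp he
        exact ⟨this.1, of_decide_eq_true this.2⟩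
      have hA : pvLoopA g (f + 1) res (n :: QA')
          = pvLoopA g f (gn.foldl PySem.Set.add res) (QA' ++ gn.map (·.1)) := by
        show pvLoopA g f (g.foldl (pvStepA n) (res, QA')).1 (g.foldl (pvStepA n) (res, QA')).2
          = _
        rw [foldA_char]
      rw [hA]
      have hPhi' : pvPhi g (QA' ++ gn.map (·.1)) ≤ f := by
        have := pvPhi_step g root hpre n hnR QA'
        rw [← hgn] at this
        omega
      have hf' : ∀ x ∈ QA' ++ gn.map (·.1), x ∈ pvReach g root := by
        intro x hx
        rcases List.mem_append.mp hx with hx | hx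
        · exact hf x (List.mem_cons_of_mem _ hx)
        · obtain ⟨e, he, rfl⟩ := List.mem_map.mp hx
          exact (pre_edges g root hpre e (hgn_mem e he).1 ((hgn_mem e he).2 ▸ hnR)).1
      by_cases hnP : n ∈ P
      · -- duplicate pop: everything A adds is already there, the ghost does not move
        have hres : gn.foldl PySem.Set.add res = res :=
          foldl_add_of_all_mem _ _
            (fun e he => (hce e (hgn_mem e he).1 ((hgn_mem e he).2 ▸ hnP)).2)
        have hb' : QB = pvDD P (QA' ++ gn.map (·.1)) := by
          rw [pvDD_append, hb]
          have h1 : pvDD P (n :: QA') = pvDD P QA' := by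
            simp only [pvDD]
            rw [if_pos ((PySem.Set.contains_iff _ _).mpr hnP)]
          have h2 : pvDD (QA'.foldl PySem.Set.add P) (gn.map (·.1)) = [] := by
            apply pvDD_eq_nil
            intro x hx
            obtain ⟨e, he, rfl⟩ := List.mem_map.mp hx
            have hseen : e.1 ∈ seen := (hce e (hgn_mem e he).1 ((hgn_mem e he).2 ▸ hnP)).1
            rcases (ha e.1).mp hseen with h | h
            · exact (mem_foldl_add_id _ _ _).mpr (Or.inl h)
            · rcases List.mem_cons.mp h with h | h
              · exact (mem_foldl_add_id _ _ _).mpr (Or.inl (h ▸ hnP))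
              · exact (mem_foldl_add_id _ _ _).mpr (Or.inr h)
          rw [h1, h2, List.append_nil]
        have ha' : ∀ x : Int, x ∈ seen ↔ (x ∈ P ∨ x ∈ QA' ++ gn.map (·.1)) := by
          intro x
          rw [ha x]
          constructor
          · rintro (h | h)
            · exact Or.inl h
            · rcases List.mem_cons.mp h with h | h
              · exact Or.inl (h ▸ hnP)
              · exact Or.inr (List.mem_append.mpr (Or.inl h))
          · rintro (h | h)
            · exact Or.inl h
            · rcases List.mem_append.mp h with h | h
              · exact Or.inr (List.mem_cons_of_mem _ h)
              · obtain ⟨e, he, rfl⟩ := List.mem_map.mp h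
                have hseen : e.1 ∈ seen :=
                  (hce e (hgn_mem e he).1 ((hgn_mem e he).2 ▸ hnP)).1
                exact (ha e.1).mp hseen
        rw [hres]
        exact ih res _ QB P seen fB ha' hb' hce hf' hPhi' hMu
      · -- first pop of n: the ghost pops it too
        have hQB : QB = n :: pvDD (PySem.Set.add P n) QA' := by
          rw [hb]
          simp only [pvDD]
          rw [if_neg (fun hcc => hnP ((PySem.Set.contains_iff _ _).mp hcc))]
        obtain ⟨fB', rfl⟩ : ∃ fB', fB = fB' + 1 := by
          have : 1 ≤ QB.length + pvU g seen := by
            rw [hQB]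
            simp only [List.length_cons]
            omega
          cases fB
          · omega
          · exact ⟨_, rfl⟩
        have hB : pvLoopG (pvIdx g) (fB' + 1) res seen QB
            = pvLoopG (pvIdx g) fB' (gn.foldl PySem.Set.add res)
                ((gn.map (·.1)).foldl PySem.Set.add seen)
                (pvDD (PySem.Set.add P n) QA' ++ pvDD seen (gn.map (·.1))) := by
          rw [hQB]
          show pvLoopG (pvIdx g) fB'
              (((pvIdx g).getD n []).foldl pvStepG (res, seen, pvDD (PySem.Set.add P n) QA')).1
              (((pvIdx g).getD n []).foldl pvStepG (res, seen, pvDD (PySem.Set.add P n) QA')).2.1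
              (((pvIdx g).getD n []).foldl pvStepG (res, seen, pvDD (PySem.Set.add P n) QA')).2.2
            = _
          rw [pvIdx_getD, ← hgn, foldG_char]
        rw [hB]
        have ha' : ∀ x : Int,
            x ∈ (gn.map (·.1)).foldl PySem.Set.add seen ↔
              (x ∈ PySem.Set.add P n ∨ x ∈ QA' ++ gn.map (·.1)) := by
          intro x
          rw [mem_foldl_add_id, ha x, PySem.Set.mem_add, List.mem_append, List.mem_cons]
          tauto
        have hb' : pvDD (PySem.Set.add P n) QA' ++ pvDD seen (gn.map (·.1))
            = pvDD (PySem.Set.add P n) (QA' ++ gn.map (·.1)) := by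
          rw [pvDD_append]
          congr 1
          apply pvDD_congr
          intro x
          rw [mem_foldl_add_id, PySem.Set.mem_add, ha x, List.mem_cons]
          tauto
        have hce' : ∀ e ∈ g, e.2 ∈ PySem.Set.add P n →
            e.1 ∈ (gn.map (·.1)).foldl PySem.Set.add seen ∧ e ∈ gn.foldl PySem.Set.add res := by
          intro e he hP'
          rcases (PySem.Set.mem_add _ _ _).mp hP' with hP2 | hP2
          · have := hce e he hP2
            exact ⟨(mem_foldl_add_id _ _ _).mpr (Or.inl this.1),
              (mem_foldl_add_id _ _ _).mpr (Or.inl this.2)⟩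
          · have hegn : e ∈ gn := by
              rw [hgn]
              exact List.mem_filter.mpr ⟨he, decide_eq_true hP2⟩
            exact ⟨(mem_foldl_add_id _ _ _).mpr (Or.inr (List.mem_map.mpr ⟨e, hegn, rfl⟩)),
              (mem_foldl_add_id _ _ _).mpr (Or.inr hegn)⟩
        have hMu' : (pvDD (PySem.Set.add P n) QA' ++ pvDD seen (gn.map (·.1))).length
            + pvU g ((gn.map (·.1)).foldl PySem.Set.add seen) ≤ fB' := by
          have hsub : ∀ x ∈ gn.map (·.1), x ∈ pvCands g := by
            intro x hx
            obtain ⟨e, he, rfl⟩ := List.mem_map.mp hx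
            have : e.1 ∈ g.map (·.1) := List.mem_map.mpr ⟨e, (hgn_mem e he).1, rfl⟩
            simpa [pvCands, PySem.List.mem_dedup] using this
          have hdrop := mu_drop (pvCands g) (by rw [pvCands]; exact PySem.List.nodup_dedup _) (gn.map (·.1)) seen hsub
          have hMuQ := hMu
          rw [hQB] at hMuQ
          simp only [pvU, List.length_append, List.length_cons] at hMuQ hdrop ⊢
          omega
        exact ih _ _ _ (PySem.Set.add P n) _ fB' ha' hb' hce' hf' hPhi' hMu'

-- the ghost loop's result is the edge lists of the popped nodes, folded into res
lemma loopG_as_ord (bt : PySem.Dict Int (List (Int × Int))) :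
    ∀ (f : Nat) (res : PySem.Set (Int × Int)) (seen : PySem.Set Int) (Q : List Int),
      pvLoopG bt f res seen Q =
        ((pvOrd bt f seen Q).flatMap (fun n => bt.getD n [])).foldl PySem.Set.add res := by
  intro f
  induction f with
  | zero => intro res seen Q; simp [pvLoopG, pvOrd]
  | succ f ih =>
    intro res seen Q
    cases Q with
    | nil => simp [pvLoopG, pvOrd]
    | cons n Q =>
      have hstep : pvLoopG bt (f + 1) res seen (n :: Q)
          = pvLoopG bt f ((bt.getD n []).foldl PySem.Set.add res)
              (((bt.getD n []).map (·.1)).foldl PySem.Set.add seen)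
              (Q ++ pvDD seen ((bt.getD n []).map (·.1))) := by
        show pvLoopG bt f ((bt.getD n []).foldl pvStepG (res, seen, Q)).1
            ((bt.getD n []).foldl pvStepG (res, seen, Q)).2.1
            ((bt.getD n []).foldl pvStepG (res, seen, Q)).2.2 = _
        rw [foldG_char]
      rw [hstep, ih]
      simp [pvOrd, List.flatMap_cons, List.foldl_append]

-- queue order = frontier, then the queue order of the fresh nodes it found
lemma ord_split (bt : PySem.Dict Int (List (Int × Int))) :
    ∀ (F N : List Int) (seen : PySem.Set Int) (f : Nat),
      pvOrd bt (f + F.length) seen (F ++ N) =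
        F ++ pvOrd bt f (pvRd bt seen F).1 (N ++ (pvRd bt seen F).2) := by
  intro F
  induction F with
  | nil => intro N seen f; simp [pvRd]
  | cons n F ih =>
    intro N seen f
    have hfuel : f + (n :: F).length = (f + F.length) + 1 := by simp; omega
    rw [hfuel]
    show n :: pvOrd bt (f + F.length) _ ((F ++ N) ++ pvDD seen ((bt.getD n []).map (·.1)))
        = _
    rw [List.append_assoc, ih]
    simp [pvRd, List.append_assoc]

lemma ord_nil (bt : PySem.Dict Int (List (Int × Int))) (f : Nat) (seen : PySem.Set Int) :
    pvOrd bt f seen [] = [] := by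
  cases f <;> rfl

lemma lvl_nil (bt : PySem.Dict Int (List (Int × Int))) (f : Nat) (seen : PySem.Set Int) :
    pvLvl bt f [] seen = [] := by
  cases f <;> rfl

-- a whole round is paid for by the seen set growing
lemma round_mu (g : List (Int × Int)) :
    ∀ (F : List Int) (seen : PySem.Set Int),
      pvU g (pvRd (pvIdx g) seen F).1 + (pvRd (pvIdx g) seen F).2.length ≤ pvU g seen := by
  intro F
  induction F with
  | nil => intro seen; simp [pvRd]
  | cons n F ih =>
    intro seen
    have hsub : ∀ x ∈ ((pvIdx g).getD n []).map (·.1), x ∈ pvCands g := by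
      intro x hx
      obtain ⟨e, he, rfl⟩ := List.mem_map.mp hx
      rw [pvIdx_getD] at he
      have : e.1 ∈ g.map (·.1) := List.mem_map.mpr ⟨e, (List.mem_filter.mp he).1, rfl⟩
      simpa [pvCands, PySem.List.mem_dedup] using this
    have hdrop := mu_drop (pvCands g) (by rw [pvCands]; exact PySem.List.nodup_dedup _)
      (((pvIdx g).getD n []).map (·.1)) seen hsub
    have hrec := ih ((((pvIdx g).getD n []).map (·.1)).foldl PySem.Set.add seen)
    simp only [pvRd, List.length_append]
    simp only [pvU] at hdrop hrec ⊢
    omega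

-- B's level loop computes the ghost queue order, given enough fuel on both sides
lemma lvl_eq_ord (g : List (Int × Int)) :
    ∀ (gl f : Nat) (seen : PySem.Set Int) (F : List Int),
      F.length + pvU g seen ≤ f → pvU g seen + 1 ≤ gl →
      pvLvl (pvIdx g) gl F seen = pvOrd (pvIdx g) f seen F := by
  intro gl
  induction gl with
  | zero => intro f seen F hf hg; omega
  | succ gl ih =>
    intro f seen F hf hg
    cases F with
    | nil => rw [ord_nil]; rfl
    | cons n F =>
      have hL : pvLvl (pvIdx g) (gl + 1) (n :: F) seen
          = (n :: F) ++ pvLvl (pvIdx g) gl (pvRd (pvIdx g) seen (n :: F)).2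
              (pvRd (pvIdx g) seen (n :: F)).1 := by
        show (n :: F) ++ pvLvl (pvIdx g) gl (pvRound (pvIdx g) seen (n :: F)).2
            (pvRound (pvIdx g) seen (n :: F)).1 = _
        rw [pvRound_eq]
      obtain ⟨f', hf'⟩ : ∃ f', f = f' + (n :: F).length := by
        refine ⟨f - (n :: F).length, ?_⟩
        simp at hf ⊢
        omega
      have hRmu := round_mu g (n :: F) seen
      have hsplit := ord_split (pvIdx g) (n :: F) [] seen f'
      rw [List.append_nil, List.nil_append] at hsplit
      rw [hL, hf', hsplit]
      congr 1
      by_cases hs : (pvRd (pvIdx g) seen (n :: F)).2 = []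
      · rw [hs, ord_nil, lvl_nil]
      · apply ih
        · omega
        · have : 1 ≤ (pvRd (pvIdx g) seen (n :: F)).2.length :=
            List.length_pos_iff.mpr hs
          omega

-- the unseen count is at most the graph length
lemma pvU_le (g : List (Int × Int)) (seen : PySem.Set Int) : pvU g seen ≤ g.length := by
  have h1 : pvU g seen ≤ (pvCands g).length := List.length_filter_le _ _
  have h2 : (pvCands g).length ≤ g.length := by
    have := PySem.Set.length_ofList_le (g.map (·.1))
    simpa [pvCands, PySem.List.dedup_eq_ofList] using this
  omega

-- ===== VERDICT (by name: the statement is the Claim_ definition above) =====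
theorem extract_subtree_spec : Claim_equal_extract_subtree := by
  intro g root _ hpre
  unfold Spec_extract_subtree extract_subtree extract_subtree_alt
  have hGhost : pvLoopA g ((g.length + 1) ^ (2 * g.length + 2)) PySem.Set.empty [root]
      = pvLoopG (pvIdx g) (g.length + 2) PySem.Set.empty
          (PySem.Set.add PySem.Set.empty root) [root] := by
    apply pvSim g root hpre _ _ _ _ PySem.Set.empty _ _
    · intro x
      constructor
      · intro hx
        rcases (PySem.Set.mem_add _ _ _).mp hx with h | h
        · simp [PySem.Set.empty] at h
        · exact Or.inr (by simp [h])
      · rintro (h | h)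
        · simp [PySem.Set.empty] at h
        · exact (PySem.Set.mem_add _ _ _).mpr (Or.inr (by simp at h ⊢; exact h))
    · simp [pvDD, PySem.Set.contains, PySem.Set.empty]
    · intro e _ h2
      simp [PySem.Set.empty] at h2
    · intro x hx
      have : x = root := by simpa using hx
      exact this ▸ root_mem_pvReach g root
    · simp only [pvPhi, List.map_cons, List.map_nil, List.sum_cons, List.sum_nil, Nat.add_zero]
      exact Nat.pow_le_pow_right (by omega) (by have := pvH_le g root; omega)
    · have := pvU_le g (PySem.Set.add PySem.Set.empty root)
      simp only [List.length_cons, List.length_nil]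
      omega
  rw [hGhost, loopG_as_ord]
  show _ = PySem.Set.ofList (List.flatMap (fun n => (pvIdx g).getD n [])
      (pvLvl (pvIdx g) (g.length + 2) [root] (PySem.Set.add PySem.Set.empty root)))
  rw [lvl_eq_ord g (g.length + 2) (g.length + 2) (PySem.Set.add PySem.Set.empty root) [root]
    (by have := pvU_le g (PySem.Set.add PySem.Set.empty root); simp only [List.length_cons, List.length_nil]; omega)
    (by have := pvU_le g (PySem.Set.add PySem.Set.empty root); omega),
    PySem.Set.ofList_eq_foldl]
  rfl
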